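-- pv_equiv track=rewrite | github.com/whyrash/SE20UARI135_AI-in-industry | 1.py | calculate_waiting_turnaround_time
-- ===== SOURCE A (Python) =====
-- def calculate_waiting_turnaround_time(patients):
--     n = len(patients)
--     waiting_time = [0] * n
--     turnaround_time = [0] * n
--
--     waiting_time[0] = 0  # First patient has no waiting time
--
--     for i in range(1, n):
--         waiting_time[i] = patients[i - 1]["treatment_time"] + waiting_time[i - 1] - patients[i]["arrival_time"]
--         waiting_time[i] = max(waiting_time[i], 0)  # Ensure waiting time is non-negative
--
--     for i in range(n):
--         turnaround_time[i] = patients[i]["treatment_time"] + waiting_time[i]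
--
--     return waiting_time, turnaround_time
-- ===== SOURCE B (Python) =====
-- def calculate_waiting_turnaround_time(patients):
--     # Closed form instead of the clamped recurrence: with deltas
--     # d[0] = 0, d[i] = treatment[i-1] - arrival[i], the reflected recurrence
--     # w[i] = max(0, w[i-1] + d[i]) has the closed form
--     # w[i] = prefix[i] - min(prefix[0..i] with 0), computed in staged passes.
--     if not patients:
--         return [], []
--     deltas = [0] + [q["treatment_time"] - p["arrival_time"]
--                     for q, p in zip(patients, patients[1:])]
--     prefix = []
--     s = 0
--     for d in deltas:
--         s += d
--         prefix.append(s)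
--     running_min = []
--     m = 0
--     for s in prefix:
--         m = min(m, s)
--         running_min.append(m)
--     waiting = [s - m for s, m in zip(prefix, running_min)]
--     turnaround = [p["treatment_time"] + w for p, w in zip(patients, waiting)]
--     return waiting, turnaround
-- ===== Notes on version B (the rewrite author's own statement) =====
-- stated objective: alternative
-- what changed: Replaces the clamped index recurrence w[i]=max(0,w[i-1]+t[i-1]-a[i]) by its closed form w[i] = prefix[i] - min(0, prefix[0..i]) over the delta sequence, computed in staged passes (deltas, prefix sums, running minima, two zips).
import Mathlib
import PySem

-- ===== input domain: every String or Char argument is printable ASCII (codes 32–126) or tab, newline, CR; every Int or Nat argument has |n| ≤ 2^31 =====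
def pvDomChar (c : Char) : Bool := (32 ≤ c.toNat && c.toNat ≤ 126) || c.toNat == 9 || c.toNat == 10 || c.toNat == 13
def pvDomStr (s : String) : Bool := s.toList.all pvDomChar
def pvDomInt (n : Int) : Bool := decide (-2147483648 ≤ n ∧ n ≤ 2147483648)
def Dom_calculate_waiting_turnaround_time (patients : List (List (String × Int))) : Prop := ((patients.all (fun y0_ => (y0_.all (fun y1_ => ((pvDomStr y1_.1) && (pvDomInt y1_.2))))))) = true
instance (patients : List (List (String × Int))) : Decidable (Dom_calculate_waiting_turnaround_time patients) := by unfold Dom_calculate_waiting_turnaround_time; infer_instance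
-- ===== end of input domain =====

-- B computes the waiting times by the closed form prefix[i] - min(0, prefix[0..i]) of the
-- clamped recurrence (staged passes: deltas, prefix sums, running minima, zips); same O(n) cost.

-- ===== PORT A =====
-- d["k"] on the association-list encoding of a dict: first match; default 0 is never
-- reached under Pre_ (missing key = KeyError, excluded by Pre_).
def pvKey (d : List (String × Int)) (k : String) : Int :=
  ((d.find? (fun kv => kv.1 == k)).map (fun kv => kv.2)).getD 0

-- patients[i] for an index produced by range(...): always 0 ≤ i < len under Pre_, exact there.
def pvAt (patients : List (List (String × Int))) (i : Int) : List (String × Int) :=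
  (PySem.List.pyGet? patients i).getD []

-- wt[i] read / wt[i] = v at an in-range nonnegative index (exact there).
def pvIdx (xs : List Int) (i : Int) : Int := (PySem.List.pyGet? xs i).getD 0

def pvStepW (patients : List (List (String × Int))) (wt : List Int) (i : Int) : List Int :=
  let wt := PySem.List.pySetD wt i (pvKey (pvAt patients (i - 1)) "treatment_time" + pvIdx wt (i - 1) - pvKey (pvAt patients i) "arrival_time")
  PySem.List.pySetD wt i (max (pvIdx wt i) 0)

def pvStepT (patients : List (List (String × Int))) (waiting : List Int) (ta : List Int) (i : Int) : List Int :=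
  PySem.List.pySetD ta i (pvKey (pvAt patients i) "treatment_time" + pvIdx waiting i)

def calculate_waiting_turnaround_time (patients : List (List (String × Int))) : List Int × List Int :=
  let n : Int := patients.length
  let waiting_time : List Int := List.replicate patients.length 0
  let turnaround_time : List Int := List.replicate patients.length 0
  let waiting_time := PySem.List.pySetD waiting_time 0 0
  let waiting_time := (PySem.List.pyRange 1 n 1).foldl (pvStepW patients) waiting_time
  let turnaround_time := (PySem.List.pyRange 0 n 1).foldl (pvStepT patients waiting_time) turnaround_time
  (waiting_time, turnaround_time)

-- ===== PORT B =====
-- deltas = [0] + [q["treatment_time"] - p["arrival_time"] for q, p in zip(patients, patients[1:])]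
-- (patients[1:] on a list is exactly List.drop 1; zip truncates like Python's zip)
def pvDeltas (patients : List (List (String × Int))) : List Int :=
  0 :: (patients.zip (patients.drop 1)).map
    (fun qp => pvKey qp.1 "treatment_time" - pvKey qp.2 "arrival_time")

-- the 'for d in deltas: s += d; prefix.append(s)' loop
def pvPrefixLoop (deltas : List Int) : List Int :=
  (deltas.foldl (fun (st : Int × List Int) d => (st.1 + d, st.2 ++ [st.1 + d])) (0, [])).2

-- the 'for s in prefix: m = min(m, s); running_min.append(m)' loop
def pvRunMinLoop (prefixSums : List Int) : List Int :=
  (prefixSums.foldl (fun (st : Int × List Int) s => (min st.1 s, st.2 ++ [min st.1 s])) (0, [])).2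

def calculate_waiting_turnaround_time_alt (patients : List (List (String × Int))) : List Int × List Int :=
  if patients.isEmpty then ([], []) else
  let deltas := pvDeltas patients
  let prefixSums := pvPrefixLoop deltas
  let runningMin := pvRunMinLoop prefixSums
  let waiting := List.zipWith (fun s m => s - m) prefixSums runningMin
  let turnaround := List.zipWith (fun p w => pvKey p "treatment_time" + w) patients waiting
  (waiting, turnaround)

-- ===== PRECONDITION & SPEC =====
def pvHasKey (d : List (String × Int)) (k : String) : Bool := d.any (fun kv => kv.1 == k)

-- exactly where Python A returns: nonempty (else IndexError on waiting_time[0]),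
-- every patient has "treatment_time" and every patient after the first has "arrival_time" (else KeyError)
def Pre_calculate_waiting_turnaround_time (patients : List (List (String × Int))) : Prop :=
  patients ≠ [] ∧ (∀ d ∈ patients, pvHasKey d "treatment_time" = true) ∧
    (∀ d ∈ patients.drop 1, pvHasKey d "arrival_time" = true)
instance (patients : List (List (String × Int))) : Decidable (Pre_calculate_waiting_turnaround_time patients) := by unfold Pre_calculate_waiting_turnaround_time; infer_instance

def pvWitness_calculate_waiting_turnaround_time : (List (List (String × Int))) :=
  [[("arrival_time", 0), ("treatment_time", 5)], [("arrival_time", 2), ("treatment_time", 3)]]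

def Spec_calculate_waiting_turnaround_time (patients : List (List (String × Int))) (out : List Int × List Int) : Prop := out = calculate_waiting_turnaround_time_alt patients
instance (patients : List (List (String × Int))) (out : List Int × List Int) : Decidable (Spec_calculate_waiting_turnaround_time patients out) := by unfold Spec_calculate_waiting_turnaround_time; infer_instance

-- ===== CLAIM (what is proved, stated in full; the proofs are below) =====
def Claim_equal_calculate_waiting_turnaround_time : Prop := ∀ (patients : List (List (String × Int))), Dom_calculate_waiting_turnaround_time patients → Pre_calculate_waiting_turnaround_time patients → Spec_calculate_waiting_turnaround_time patients (calculate_waiting_turnaround_time patients)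


-- ===== LEMMAS AND PROOFS =====

-- common proof-side characterisation: the waiting times from index 1 on, as a recursion
-- carrying the previous patient's end time e (waiting w = max 0 (e - arrival), e' = treatment + w)
def pvGoB (prev_end : Int) (ps : List (List (String × Int))) : List Int :=
  match ps with
  | [] => []
  | p :: rest =>
    let w := max 0 (prev_end - pvKey p "arrival_time")
    w :: pvGoB (pvKey p "treatment_time" + w) rest

theorem pvGoB_length (pe : Int) (ps : List (List (String × Int))) :
    (pvGoB pe ps).length = ps.length := by
  induction ps generalizing pe with
  | nil => rfl
  | cons p rest ih => simp [pvGoB, ih]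

theorem pvIdx_natCast (xs : List Int) (j : Nat) (h : j < xs.length) :
    pvIdx xs (j : Int) = xs[j] := by
  simp [pvIdx, PySem.List.pyGet?_natCast, List.getElem?_eq_getElem h]

theorem pvAt_natCast (ps : List (List (String × Int))) (j : Nat) (h : j < ps.length) :
    pvAt ps (j : Int) = ps[j] := by
  simp [pvAt, PySem.List.pyGet?_natCast, List.getElem?_eq_getElem h]

theorem pvSet_take (xs : List Int) (j : Nat) (v : Int) (h : j < xs.length) :
    (xs.set j v).take (j + 1) = xs.take j ++ [v] := by
  have hl : (xs.take j).length = j := by simp [Nat.le_of_lt h]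
  rw [List.set_eq_take_append_cons_drop, if_pos h]
  rw [show j + 1 = (xs.take j).length + 1 by omega, List.take_append]
  simp

-- one step of A's waiting loop at an in-range index is a single set
theorem pvStepW_eq (patients : List (List (String × Int))) (wt : List Int) (j : Nat)
    (h : j < wt.length) :
    pvStepW patients wt (j : Int)
      = wt.set j (max (pvKey (pvAt patients ((j : Int) - 1)) "treatment_time"
          + pvIdx wt ((j : Int) - 1) - pvKey (pvAt patients (j : Int)) "arrival_time") 0) := by
  simp only [pvStepW, PySem.List.pySetD_natCast]
  rw [pvIdx_natCast _ j (by simpa using h)]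
  simp [List.getElem_set_self, List.set_set]

-- invariant of A's first loop: from index j on it computes the pvGoB recursion
theorem loopW (patients : List (List (String × Int))) (k : Nat) :
    ∀ (j : Nat) (wt : List Int), patients.length - j = k → wt.length = patients.length →
      1 ≤ j → j ≤ patients.length →
      (PySem.List.pyRange (j : Int) (patients.length : Int) 1).foldl (pvStepW patients) wt
        = wt.take j ++ pvGoB (pvKey (pvAt patients ((j : Int) - 1)) "treatment_time"
            + pvIdx wt ((j : Int) - 1)) (patients.drop j) := by
  induction k with
  | zero =>
    intro j wt hk hlen h1 hj
    have hjn : j = patients.length := by omega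
    rw [PySem.List.pyRange_one_eq_nil (by omega)]
    rw [hjn, List.drop_length]
    simp [pvGoB, List.take_of_length_le (show wt.length ≤ patients.length by omega)]
  | succ k ih =>
    intro j wt hk hlen h1 hj
    have hjlt : j < patients.length := by omega
    rw [PySem.List.pyRange_one_cons (by exact_mod_cast hjlt)]
    simp only [List.foldl_cons]
    rw [pvStepW_eq patients wt j (by omega)]
    set v := max (pvKey (pvAt patients ((j : Int) - 1)) "treatment_time"
        + pvIdx wt ((j : Int) - 1) - pvKey (pvAt patients (j : Int)) "arrival_time") 0 with hv
    have hcast : ((j : Int) + 1) = ((j + 1 : Nat) : Int) := by push_cast; ring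
    rw [hcast, ih (j + 1) (wt.set j v) (by omega) (by simpa using hlen) (by omega) (by omega)]
    have hidx : pvIdx (wt.set j v) (((j + 1 : Nat) : Int) - 1) = v := by
      rw [show (((j + 1 : Nat) : Int) - 1) = ((j : Nat) : Int) by push_cast; ring,
        pvIdx_natCast _ j (by simp; omega)]
      simp
    have hdropj : patients.drop j = patients[j] :: patients.drop (j + 1) :=
      List.drop_eq_getElem_cons hjlt
    rw [hidx, pvSet_take wt j v (by omega)]
    have hat1 : pvAt patients (((j + 1 : Nat) : Int) - 1) = patients[j] := by
      rw [show (((j + 1 : Nat) : Int) - 1) = ((j : Nat) : Int) by push_cast; ring,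
        pvAt_natCast _ j hjlt]
    have hatj : pvAt patients ((j : Nat) : Int) = patients[j] := pvAt_natCast _ j hjlt
    rw [hat1, hdropj]
    simp only [pvGoB]
    rw [hatj] at hv
    have hw : max 0 ((pvKey (pvAt patients ((j : Int) - 1)) "treatment_time"
        + pvIdx wt ((j : Int) - 1)) - pvKey patients[j] "arrival_time") = v := by
      rw [hv]; omega
    rw [hw]
    simp

-- invariant of A's second loop
theorem loopT (patients : List (List (String × Int))) (waiting : List Int)
    (hw : waiting.length = patients.length) (k : Nat) :
    ∀ (j : Nat) (ta : List Int), patients.length - j = k → ta.length = patients.length →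
      j ≤ patients.length →
      (PySem.List.pyRange (j : Int) (patients.length : Int) 1).foldl (pvStepT patients waiting) ta
        = ta.take j ++ List.zipWith (fun p w => pvKey p "treatment_time" + w)
            (patients.drop j) (waiting.drop j) := by
  induction k with
  | zero =>
    intro j ta hk hlen hj
    have hjn : j = patients.length := by omega
    rw [PySem.List.pyRange_one_eq_nil (by omega)]
    rw [hjn, List.drop_length, List.drop_eq_nil_of_le (show waiting.length ≤ patients.length by omega)]
    simp [List.take_of_length_le (show ta.length ≤ patients.length by omega)]
  | succ k ih =>
    intro j ta hk hlen hj
    have hjlt : j < patients.length := by omega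
    rw [PySem.List.pyRange_one_cons (by exact_mod_cast hjlt)]
    simp only [List.foldl_cons]
    have hstep : pvStepT patients waiting ta (j : Int)
        = ta.set j (pvKey patients[j] "treatment_time" + waiting[j]'(by omega)) := by
      simp only [pvStepT, PySem.List.pySetD_natCast]
      rw [pvAt_natCast _ j hjlt, pvIdx_natCast _ j (by omega)]
    rw [hstep]
    have hcast : ((j : Int) + 1) = ((j + 1 : Nat) : Int) := by push_cast; ring
    set v := pvKey patients[j] "treatment_time" + waiting[j]'(by omega) with hv
    rw [hcast, ih (j + 1) (ta.set j v) (by omega) (by simpa using hlen) (by omega)]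
    rw [pvSet_take ta j v (by omega)]
    have hz : List.zipWith (fun p w => pvKey p "treatment_time" + w)
        (patients.drop j) (waiting.drop j)
        = v :: List.zipWith (fun p w => pvKey p "treatment_time" + w)
            (patients.drop (j + 1)) (waiting.drop (j + 1)) := by
      rw [List.drop_eq_getElem_cons hjlt,
        List.drop_eq_getElem_cons (show j < waiting.length by omega)]
      simp only [List.zipWith_cons_cons, hv]
    rw [hz]
    simp

-- ===== B-side lemmas: prefix-sum / running-minimum closed form =====

-- prefix sums starting from s (the list the append-fold builds)
def pvScan (s : Int) : List Int → List Int
  | [] => []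
  | d :: ds => (s + d) :: pvScan (s + d) ds

-- running minima starting from m
def pvMinScan (m : Int) : List Int → List Int
  | [] => []
  | x :: xs => min m x :: pvMinScan (min m x) xs

-- the clamped recurrence w' = max 0 (w + d), listed
def pvW (w : Int) : List Int → List Int
  | [] => []
  | d :: ds => max 0 (w + d) :: pvW (max 0 (w + d)) ds

theorem pvPrefixLoop_aux (ds : List Int) :
    ∀ (s : Int) (out : List Int),
      (ds.foldl (fun (st : Int × List Int) d => (st.1 + d, st.2 ++ [st.1 + d])) (s, out)).2
        = out ++ pvScan s ds := by
  induction ds with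
  | nil => intro s out; simp [pvScan]
  | cons d ds ih => intro s out; simp [pvScan, ih]

theorem pvRunMinLoop_aux (xs : List Int) :
    ∀ (m : Int) (out : List Int),
      (xs.foldl (fun (st : Int × List Int) x => (min st.1 x, st.2 ++ [min st.1 x])) (m, out)).2
        = out ++ pvMinScan m xs := by
  induction xs with
  | nil => intro m out; simp [pvMinScan]
  | cons x xs ih => intro m out; simp [pvMinScan, ih]

-- the closed form: prefix sum minus running minimum equals the clamped recurrence
theorem scan_sub_minScan (ds : List Int) :
    ∀ (s m : Int), List.zipWith (fun a b => a - b) (pvScan s ds) (pvMinScan m (pvScan s ds))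
      = pvW (s - m) ds := by
  induction ds with
  | nil => intro s m; rfl
  | cons d ds ih =>
    intro s m
    simp only [pvScan, pvMinScan, pvW, List.zipWith_cons_cons]
    have h : (s + d) - min m (s + d) = max 0 ((s - m) + d) := by omega
    rw [ih (s + d) (min m (s + d)), show (s + d) - min m (s + d) = max 0 ((s - m) + d) from h]

-- the clamped recurrence over the deltas is the pvGoB recursion
theorem pvW_goB (rest : List (List (String × Int))) :
    ∀ (p : List (String × Int)) (w : Int),
      pvW w (((p :: rest).zip rest).map
          (fun qp => pvKey qp.1 "treatment_time" - pvKey qp.2 "arrival_time"))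
        = pvGoB (pvKey p "treatment_time" + w) rest := by
  induction rest with
  | nil => intro p w; rfl
  | cons q rest ih =>
    intro p w
    simp only [List.zip_cons_cons, List.map_cons, pvW, pvGoB]
    have h : max 0 (w + (pvKey p "treatment_time" - pvKey q "arrival_time"))
        = max 0 (pvKey p "treatment_time" + w - pvKey q "arrival_time") := by omega
    rw [h, ih q]

-- B's waiting list, for a nonempty patient list
theorem alt_waiting (p0 : List (String × Int)) (rest : List (List (String × Int))) :
    List.zipWith (fun s m => s - m) (pvPrefixLoop (pvDeltas (p0 :: rest)))
        (pvRunMinLoop (pvPrefixLoop (pvDeltas (p0 :: rest))))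
      = 0 :: pvGoB (pvKey p0 "treatment_time") rest := by
  have hD : pvDeltas (p0 :: rest)
      = 0 :: ((p0 :: rest).zip rest).map
          (fun qp => pvKey qp.1 "treatment_time" - pvKey qp.2 "arrival_time") := by
    simp [pvDeltas]
  rw [hD]
  rw [pvPrefixLoop, pvPrefixLoop_aux, pvRunMinLoop, pvRunMinLoop_aux]
  simp only [List.nil_append, pvScan, pvMinScan, List.zipWith_cons_cons]
  norm_num
  rw [show (0 : Int) = 0 - 0 by ring, scan_sub_minScan, pvW_goB]
  norm_num

-- ===== VERDICT (by name: the statement is the Claim_ definition above) =====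
theorem calculate_waiting_turnaround_time_spec : Claim_equal_calculate_waiting_turnaround_time := by
  intro patients _ hpre
  obtain ⟨hne, -, -⟩ := hpre
  have hn : 1 ≤ patients.length := List.length_pos_iff.mpr hne
  unfold Spec_calculate_waiting_turnaround_time
  unfold calculate_waiting_turnaround_time calculate_waiting_turnaround_time_alt
  simp only []
  rw [if_neg (by simpa using hne)]
  have hset0 : PySem.List.pySetD (List.replicate patients.length (0 : Int)) 0 0
      = List.replicate patients.length (0 : Int) := by
    rw [show ((0 : Int)) = ((0 : Nat) : Int) from rfl, PySem.List.pySetD_natCast]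
    exact List.set_replicate_self ..
  rw [hset0]
  have hW := loopW patients (patients.length - 1) 1 (List.replicate patients.length 0)
    rfl (by simp) (le_refl 1) hn
  have hidx0 : pvIdx (List.replicate patients.length (0 : Int)) (((1 : Nat) : Int) - 1) = 0 := by
    rw [show (((1 : Nat) : Int) - 1) = ((0 : Nat) : Int) by norm_num,
      pvIdx_natCast _ 0 (by simpa using hn)]
    simp
  rw [hidx0] at hW
  set fe := pvKey (pvAt patients (((1 : Nat) : Int) - 1)) "treatment_time" with hfe
  have htake1 : (List.replicate patients.length (0 : Int)).take 1 = [0] := by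
    cases patients with
    | nil => simp at hn
    | cons p rest => simp [List.replicate_succ]
  rw [htake1] at hW
  norm_num at hW
  rw [hW]
  have hwlen : ((0 : Int) :: pvGoB fe (patients.drop 1)).length = patients.length := by
    rw [List.length_cons, pvGoB_length, List.length_drop]; omega
  have hT := loopT patients ((0 : Int) :: pvGoB fe (patients.drop 1)) hwlen
    patients.length 0 (List.replicate patients.length 0) (by omega) (by simp) (by omega)
  norm_num at hT
  rw [hT]
  cases patients with
  | nil => simp at hn
  | cons p0 rest =>
    have hp0 : pvAt (p0 :: rest) 0 = p0 := by
      simp [pvAt, PySem.List.pyGet?, PySem.List.pyIdx?]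
    have hfe0 : fe = pvKey p0 "treatment_time" := by
      rw [hfe]; norm_num; rw [hp0]
    rw [show (p0 :: rest).drop 1 = rest from rfl] at *
    rw [alt_waiting p0 rest, ← hfe0]
    simp only [List.tail_cons]
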